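-- pv_equiv track=rewrite | github.com/chandrarajat/string-search-algorithms | shiftAnd.py | shiftAnd
-- ===== SOURCE A (Python) =====
-- def shiftAnd(pattern, text):
--
--     if len(pattern) == 0 or len(text) == 0:
--         raise ValueError("Pattern and Text must be > 1 in length")
--
--     match_indexes = []
--
--     m = len(pattern)
--     B = {}
--     for j in range(m):
--         try:
--             mask = B[pattern[j]]
--         except KeyError:
--             mask = 0
--
--         B[pattern[j]] = mask | 1 << j
--
--     D = 0
--     for pos, char in enumerate(text):
--         try:
--             mask = B[char]
--         except KeyError:
--             mask = 0
--
--         D = (D << 1 | 1) & mask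
--
--         if D & (1 << m-1):
--             match_indexes.append(pos-m+1)
--
--     return match_indexes
-- ===== SOURCE B (Python) =====
-- def shiftAnd(pattern, text):
--
--     if len(pattern) == 0 or len(text) == 0:
--         raise ValueError("Pattern and Text must be > 1 in length")
--
--     m = len(pattern)
--     return [i for i in range(len(text) - m + 1) if text[i:i+m] == pattern]
-- ===== Notes on version B (the rewrite author's own statement) =====
-- stated objective: simpler
-- what changed: Replaces the bit-parallel Shift-And automaton (character mask-table build pass plus a shifted bit-state scan emitting match ends) with a direct one-line sweep that compares the slice text[i:i+m] against the pattern at every candidate start position; the empty-pattern/empty-text ValueError guard is kept identical.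
import Mathlib
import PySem

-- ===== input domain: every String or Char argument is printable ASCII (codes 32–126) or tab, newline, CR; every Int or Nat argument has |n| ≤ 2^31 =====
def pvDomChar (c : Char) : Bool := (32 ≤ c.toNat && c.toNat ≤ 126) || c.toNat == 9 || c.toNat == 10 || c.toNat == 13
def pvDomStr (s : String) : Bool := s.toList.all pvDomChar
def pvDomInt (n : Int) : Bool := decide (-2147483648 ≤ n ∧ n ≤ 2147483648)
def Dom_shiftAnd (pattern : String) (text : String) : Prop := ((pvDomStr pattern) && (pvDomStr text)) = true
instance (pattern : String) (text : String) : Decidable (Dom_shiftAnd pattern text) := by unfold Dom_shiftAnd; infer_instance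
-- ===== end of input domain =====

-- B replaces the Shift-And bit-parallel scan by a plain slice-comparison sweep over all start positions (objective: simpler; same results, same ValueError guard).

-- ===== PORT A =====
-- the 'for j in range(m): B[pattern[j]] = B.get-or-0 | 1 << j' loop (try/except KeyError = getD 0);
-- Python's unbounded nonnegative int masks are ported as Nat (all mask values here are nonnegative, so this is exact)
def pvBuildB : List Char → Nat → PySem.Dict Char Nat → PySem.Dict Char Nat
  | [], _, B => B
  | c :: rest, j, B => pvBuildB rest (j + 1) (B.insert c ((B.getD c 0) ||| (1 <<< j)))

-- the 'for pos, char in enumerate(text)' loop: state D and the accumulated match_indexes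
def pvScan (B : PySem.Dict Char Nat) (m : Nat) : List Char → Int → Nat → List Int → List Int
  | [], _, _, acc => acc
  | c :: rest, pos, D, acc =>
    let mask := B.getD c 0
    let D' := ((D <<< 1) ||| 1) &&& mask
    pvScan B m rest (pos + 1) D' (if D' &&& (1 <<< (m - 1)) ≠ 0 then acc ++ [pos - (m : Int) + 1] else acc)

def shiftAnd (pattern : String) (text : String) : List Int :=
  let pat := pattern.toList
  let txt := text.toList
  if pat.length == 0 || txt.length == 0 then []   -- Python raises ValueError here; excluded by Pre_shiftAnd
  else pvScan (pvBuildB pat 0 PySem.Dict.empty) pat.length txt 0 0 []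

-- ===== PORT B =====
def shiftAnd_alt (pattern : String) (text : String) : List Int :=
  let pat := pattern.toList
  let txt := text.toList
  if pat.length == 0 || txt.length == 0 then []   -- Python raises ValueError here; excluded by Pre_shiftAnd
  else
    let m : Int := pat.length
    (PySem.List.pyRange 0 ((txt.length : Int) - m + 1) 1).filter
      (fun i => PySem.List.slice txt (some i) (some (i + m)) == pat)

-- ===== PRECONDITION & SPEC =====
-- Pre_ excludes exactly the inputs (empty pattern or empty text) on which A raises ValueError
def Pre_shiftAnd (pattern : String) (text : String) : Prop :=
  pattern.toList ≠ [] ∧ text.toList ≠ []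
instance (pattern : String) (text : String) : Decidable (Pre_shiftAnd pattern text) := by
  unfold Pre_shiftAnd; infer_instance
def pvWitness_shiftAnd : String × String := ("ab", "cabab")

def Spec_shiftAnd (pattern : String) (text : String) (out : List Int) : Prop := out = shiftAnd_alt pattern text
instance (pattern : String) (text : String) (out : List Int) : Decidable (Spec_shiftAnd pattern text out) := by unfold Spec_shiftAnd; infer_instance

-- ===== CLAIM (what is proved, stated in full; the proofs are below) =====
def Claim_equal_shiftAnd : Prop := ∀ (pattern : String) (text : String), Dom_shiftAnd pattern text → Pre_shiftAnd pattern text → Spec_shiftAnd pattern text (shiftAnd pattern text)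

-- ===== LEMMAS AND PROOFS =====

-- 'D & (1 << k)' is nonzero exactly when bit k of D is set
lemma pvAndPow (D k : Nat) : (D &&& (1 <<< k) ≠ 0) ↔ D.testBit k := by
  rw [Nat.one_shiftLeft, Nat.and_two_pow]
  cases h : D.testBit k <;> simp

-- suffix of a concat
lemma pvConcatSuffix (a b : List Char) (x y : Char) :
    a ++ [x] <:+ b ++ [y] ↔ x = y ∧ a <:+ b := by
  rw [← List.reverse_prefix, List.reverse_append, List.reverse_append]
  simp only [List.reverse_singleton, List.singleton_append, List.cons_prefix_cons,
    List.reverse_prefix]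

-- bit j of the mask stored for c by the table-building loop
lemma pvBuildB_getD (rest : List Char) (j0 : Nat) (B : PySem.Dict Char Nat) (c : Char) (j : Nat) :
    ((pvBuildB rest j0 B).getD c 0).testBit j ↔
      (B.getD c 0).testBit j ∨ (j0 ≤ j ∧ rest[j - j0]? = some c) := by
  induction rest generalizing j0 B with
  | nil => simp [pvBuildB]
  | cons c' rest ih =>
    simp only [pvBuildB]
    rw [ih, PySem.Dict.getD_insert]
    rcases Nat.lt_trichotomy j j0 with h | h | h
    · have h1 : ¬ j0 ≤ j := by omega
      have h2 : ¬ j0 + 1 ≤ j := by omega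
      split_ifs with hc
      · subst hc
        simp only [Nat.testBit_or, Nat.one_shiftLeft, Nat.testBit_two_pow, h1, h2,
          Bool.or_eq_true, decide_eq_true_eq, false_and, or_false]
        have hne : j0 ≠ j := by omega
        tauto
      · simp [h1, h2]
    · subst h
      have h2 : ¬ j + 1 ≤ j := by omega
      simp only [Nat.sub_self, List.getElem?_cons_zero, le_refl, true_and, h2, false_and, or_false]
      split_ifs with hc
      · subst hc
        simp [Nat.testBit_or, Nat.one_shiftLeft]
      · simp only [Option.some_inj, iff_self_or]
        exact fun hEq => absurd hEq.symm hc
    · have h1 : j0 ≤ j := by omega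
      have h2 : j0 + 1 ≤ j := by omega
      have h3 : j - j0 = (j - (j0 + 1)) + 1 := by omega
      rw [h3, List.getElem?_cons_succ]
      split_ifs with hc
      · subst hc
        simp only [Nat.testBit_or, Nat.one_shiftLeft, Nat.testBit_two_pow, h1, h2,
          Bool.or_eq_true, decide_eq_true_eq, true_and]
        have hne : j0 ≠ j := by omega
        tauto
      · simp [h1, h2]

lemma pvMask_testBit (pat : List Char) (c : Char) (j : Nat) :
    ((pvBuildB pat 0 PySem.Dict.empty).getD c 0).testBit j ↔ pat[j]? = some c := by
  rw [pvBuildB_getD]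
  simp [PySem.Dict.getD_empty]

-- one scan step preserves the bit-state invariant
lemma pvInv_step (pat pre : List Char) (c : Char) (D : Nat)
    (hInv : ∀ j, D.testBit j ↔ (j + 1 ≤ pre.length ∧ j + 1 ≤ pat.length ∧ pat.take (j+1) <:+ pre)) :
    ∀ j, (((D <<< 1) ||| 1) &&& ((pvBuildB pat 0 PySem.Dict.empty).getD c 0)).testBit j ↔
      (j + 1 ≤ pre.length + 1 ∧ j + 1 ≤ pat.length ∧ pat.take (j+1) <:+ pre ++ [c]) := by
  intro j
  rw [Nat.testBit_and, Nat.testBit_or]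
  have h1 : Nat.testBit 1 j = decide (0 = j) := @Nat.testBit_two_pow 0 j
  rw [h1, Nat.testBit_shiftLeft]
  simp only [Bool.and_eq_true, Bool.or_eq_true, decide_eq_true_eq]
  rw [pvMask_testBit pat c j]
  cases j with
  | zero =>
    constructor
    · rintro ⟨-, h⟩
      obtain ⟨hlt, hv⟩ := List.getElem?_eq_some_iff.mp h
      refine ⟨by omega, by omega, ?_⟩
      rw [List.take_succ, List.take_zero, List.nil_append, h]
      show [] ++ [c] <:+ pre ++ [c]
      rw [pvConcatSuffix]
      exact ⟨rfl, List.nil_suffix⟩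
    · rintro ⟨-, h1, h2⟩
      have hlt : 0 < pat.length := by omega
      rw [List.take_succ, List.take_zero, List.nil_append,
        List.getElem?_eq_getElem hlt] at h2
      have h3 : [] ++ [pat[0]] <:+ pre ++ [c] := by simpa using h2
      rw [pvConcatSuffix] at h3
      exact ⟨Or.inr rfl, by rw [List.getElem?_eq_getElem hlt, h3.1]⟩
  | succ j' =>
    constructor
    · rintro ⟨h', hc⟩
      have hD : D.testBit j' = true := by
        rcases h' with ⟨-, h''⟩ | h''
        · exact h''
        · exact absurd h'' (by omega)
      rw [hInv j'] at hD
      obtain ⟨hl, hm, hs⟩ := hD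
      obtain ⟨hlt, hv⟩ := List.getElem?_eq_some_iff.mp hc
      refine ⟨by omega, by omega, ?_⟩
      rw [List.take_succ, List.getElem?_eq_getElem hlt, hv]
      show pat.take (j' + 1) ++ [c] <:+ pre ++ [c]
      rw [pvConcatSuffix]
      exact ⟨rfl, hs⟩
    · rintro ⟨ha, hb, h3⟩
      have hlt : j' + 1 < pat.length := by omega
      rw [List.take_succ, List.getElem?_eq_getElem hlt] at h3
      have h3' : pat.take (j' + 1) ++ [pat[j' + 1]] <:+ pre ++ [c] := by simpa using h3
      rw [pvConcatSuffix] at h3'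
      have hD : D.testBit j' = true := by
        rw [hInv j']
        exact ⟨by omega, by omega, h3'.2⟩
      exact ⟨Or.inl ⟨by omega, hD⟩,
        by rw [List.getElem?_eq_getElem hlt, h3'.1]⟩

def pvSeg (pat : List Char) : List Char → List Char → List Int
  | _, [] => []
  | pre, c :: rest =>
      (if pat <:+ pre ++ [c] then [(pre.length : Int) - pat.length + 1] else [])
        ++ pvSeg pat (pre ++ [c]) rest

lemma pvScan_eq (pat : List Char) (hm : pat ≠ []) :
    ∀ (rest pre : List Char) (D : Nat) (acc : List Int),
      (∀ j, D.testBit j ↔ (j + 1 ≤ pre.length ∧ j + 1 ≤ pat.length ∧ pat.take (j+1) <:+ pre)) →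
      pvScan (pvBuildB pat 0 PySem.Dict.empty) pat.length rest (pre.length : Int) D acc
        = acc ++ pvSeg pat pre rest := by
  intro rest
  induction rest with
  | nil => intro pre D acc _; simp [pvScan, pvSeg]
  | cons c rest ih =>
    intro pre D acc hInv
    have hm0 : 0 < pat.length := List.length_pos_of_ne_nil hm
    have hstep := pvInv_step pat pre c D hInv
    have hcond : ((((D <<< 1) ||| 1) &&&
        ((pvBuildB pat 0 PySem.Dict.empty).getD c 0)) &&& (1 <<< (pat.length - 1)) ≠ 0)
        ↔ pat <:+ pre ++ [c] := by
      rw [pvAndPow, hstep (pat.length - 1), (by omega : pat.length - 1 + 1 = pat.length),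
        List.take_length]
      constructor
      · rintro ⟨-, -, h⟩; exact h
      · intro h
        have := h.length_le
        simp only [List.length_append, List.length_singleton] at this
        exact ⟨by omega, le_refl _, h⟩
    simp only [pvScan, pvSeg]
    rw [if_congr hcond rfl rfl]
    have hpos : (pre.length : Int) + 1 = ((pre ++ [c]).length : Int) := by
      simp
    rw [hpos, ih (pre ++ [c]) _ _ (by
      intro j
      rw [hstep j]
      simp [List.length_append])]
    split_ifs with hs <;> simp

lemma pvSeg_spec (pat : List Char) :
    ∀ (rest pre : List Char), pvSeg pat pre rest =
      (List.range rest.length).filterMap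
        (fun t => if pat <:+ pre ++ rest.take (t+1) then some (((pre.length : Int) + t) - pat.length + 1) else none) := by
  intro rest
  induction rest with
  | nil => intro pre; simp [pvSeg]
  | cons c rest ih =>
    intro pre
    simp only [pvSeg]
    have htail : ∀ t ∈ List.range rest.length,
        ((fun t => if pat <:+ pre ++ (c :: rest).take (t+1) then some (((pre.length : Int) + t) - pat.length + 1) else none) ∘ Nat.succ) t
        = (fun t => if pat <:+ (pre ++ [c]) ++ rest.take (t+1) then some ((((pre ++ [c]).length : Int) + t) - pat.length + 1) else none) t := by
      intro t _
      simp only [Function.comp_apply, Nat.succ_eq_add_one, List.take_succ_cons]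
      rw [show pre ++ c :: rest.take (t+1) = (pre ++ [c]) ++ rest.take (t+1) by simp]
      split_ifs with hs
      · simp only [Option.some_inj]
        have hlen : (((pre ++ [c]).length : Int)) = (pre.length : Int) + 1 := by simp
        rw [hlen]
        push_cast
        ring
      · rfl
    rw [ih (pre ++ [c]), List.length_cons, List.range_succ_eq_map, List.filterMap_cons,
      List.filterMap_map, List.filterMap_congr htail]
    by_cases h : pat <:+ pre ++ [c]
    · simp only [show (c :: rest).take (0+1) = [c] from rfl, Nat.cast_zero, add_zero,
        if_pos h]
      simp
    · simp only [show (c :: rest).take (0+1) = [c] from rfl, if_neg h]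
      simp

lemma pvFilterMap_if (P : Nat → Prop) [DecidablePred P] (l : List Nat) (f : Nat → Int) :
    l.filterMap (fun a => if P a then some (f a) else none)
      = (l.filter (fun a => decide (P a))).map f := by
  induction l with
  | nil => rfl
  | cons a l ih => by_cases h : P a <;> simp [h, ih]


lemma pvSuffix_iff_drop (pat l : List Char) (t : Nat) (hl : l.length = pat.length + t) :
    pat <:+ l ↔ l.drop t = pat := by
  constructor
  · rintro ⟨u, hu⟩
    have hlen : u.length = t := by
      have := congrArg List.length hu
      simp only [List.length_append] at this
      omega
    rw [← hu, ← hlen, List.drop_left]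
  · intro h
    exact ⟨l.take t, by rw [← h]; exact List.take_append_drop t l⟩

-- ===== VERDICT (by name: the statement is the Claim_ definition above) =====
theorem shiftAnd_spec : Claim_equal_shiftAnd := by
  unfold Claim_equal_shiftAnd
  intro pattern text _ hpre
  obtain ⟨hp, ht⟩ := hpre
  unfold Spec_shiftAnd
  simp only [shiftAnd, shiftAnd_alt]
  generalize hP : pattern.toList = pat at hp ⊢
  generalize hT : text.toList = txt at ht ⊢
  have hm0 : 0 < pat.length := List.length_pos_of_ne_nil hp
  have hg : ¬ ((pat.length == 0 || txt.length == 0) = true) := by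
    simp [List.length_eq_zero_iff, hp, ht]
  rw [if_neg hg, if_neg hg]
  have hinv0 : ∀ j, (0 : Nat).testBit j ↔
      (j + 1 ≤ ([] : List Char).length ∧ j + 1 ≤ pat.length ∧ pat.take (j+1) <:+ ([] : List Char)) := by
    intro j; simp
  have hA := pvScan_eq pat hp txt [] 0 [] hinv0
  simp only [List.length_nil, Nat.cast_zero, List.nil_append] at hA
  rw [hA, pvSeg_spec pat txt []]
  simp only [List.length_nil, Nat.cast_zero, List.nil_append, zero_add]
  by_cases hmn : pat.length ≤ txt.length
  · -- at least one candidate window exists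
    have hsplit : txt.length = (pat.length - 1) + (txt.length - pat.length + 1) := by omega
    have hnil : (List.range (pat.length - 1)).filterMap
        (fun t => if pat <:+ txt.take (t+1) then some ((t : Int) - pat.length + 1) else none) = [] := by
      rw [List.filterMap_eq_nil_iff]
      intro t htm
      rw [List.mem_range] at htm
      rw [if_neg]
      intro hs
      have h1 := hs.length_le
      rw [List.length_take] at h1
      omega
    have hL : ∀ t ∈ List.range (txt.length - pat.length + 1),
        ((fun t => if pat <:+ txt.take (t+1) then some ((t : Int) - pat.length + 1) else none)
            ∘ (fun x => pat.length - 1 + x)) t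
        = (fun t => if (txt.drop t).take pat.length = pat then some ((t : Int)) else none) t := by
      intro t htm
      rw [List.mem_range] at htm
      simp only [Function.comp_apply]
      have hidx : pat.length - 1 + t + 1 = pat.length + t := by omega
      simp only [hidx]
      have hlen : (txt.take (pat.length + t)).length = pat.length + t := by
        rw [List.length_take]; omega
      simp only [pvSuffix_iff_drop pat _ t hlen, List.drop_take,
        (show pat.length + t - t = pat.length by omega)]
      split_ifs with hC
      · simp only [Option.some_inj]
        omega
      · rfl
    have hAside : (List.range txt.length).filterMap
        (fun t => if pat <:+ txt.take (t+1) then some ((t : Int) - pat.length + 1) else none)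
        = ((List.range (txt.length - pat.length + 1)).filter
            (fun a => decide ((txt.drop a).take pat.length = pat))).map (fun t : Nat => (t : Int)) := by
      conv_lhs => rw [hsplit]
      rw [List.range_add, List.filterMap_append, List.filterMap_map, hnil, List.nil_append,
        List.filterMap_congr hL,
        pvFilterMap_if (fun t => (txt.drop t).take pat.length = pat)
          (List.range (txt.length - pat.length + 1)) (fun t : Nat => (t : Int))]
    have hBfun : ∀ k ∈ List.range (txt.length - pat.length + 1),
        ((fun i => PySem.List.slice txt (some i) (some (i + (pat.length : Int))) == pat)
            ∘ (fun k : Nat => (0 : Int) + k)) k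
        = (fun a => decide ((txt.drop a).take pat.length = pat)) k := by
      intro k _
      simp only [Function.comp_apply, zero_add]
      rw [PySem.List.slice_natCast_add]
      by_cases h : (txt.drop k).take pat.length = pat <;> simp [h]
    have hBside : (PySem.List.pyRange 0 ((txt.length : Int) - pat.length + 1) 1).filter
          (fun i => PySem.List.slice txt (some i) (some (i + (pat.length : Int))) == pat)
        = ((List.range (txt.length - pat.length + 1)).filter
            (fun a => decide ((txt.drop a).take pat.length = pat))).map (fun t : Nat => (t : Int)) := by
      rw [show (txt.length : Int) - (pat.length : Int) + 1
          = ((txt.length - pat.length + 1 : Nat) : Int) by omega, PySem.List.pyRange_one]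
      simp only [sub_zero, Int.toNat_natCast]
      rw [List.filter_map, List.filter_congr hBfun]
      simp
    rw [hAside, hBside]
  · -- pattern longer than text: both sides empty
    have h1 : (List.range txt.length).filterMap
        (fun t => if pat <:+ txt.take (t+1) then some ((t : Int) - pat.length + 1) else none) = [] := by
      rw [List.filterMap_eq_nil_iff]
      intro t htm
      rw [if_neg]
      intro hs
      have hle := hs.length_le
      rw [List.length_take] at hle
      omega
    have h2 : PySem.List.pyRange 0 ((txt.length : Int) - pat.length + 1) 1 = [] :=
      PySem.List.pyRange_one_eq_nil (by omega)
    rw [h1, h2, List.filter_nil]
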